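-- pv_equiv track=rewrite | github.com/Sassa-nf/pi | stack_2/b.py | getMinimumSecondsRequired
-- ===== SOURCE A (Python) =====
-- from typing import List
--
-- def getMinimumSecondsRequired(N: int, R: List[int], A: int, B: int) -> int:
--   R = [0] + R
--   memo = [[] for _ in R]
--
--   # adjust R to make sure the discs are not smaller than their position in list
--   # - that is the smallest they are allowed to be; this incurs the baseline cost
--   baseline = 0
--   for i, r in enumerate(R):
--      if r < i:
--         baseline += A * (i - r)
--         R[i] = i
--   cost = findMin(R, 1, A, memo) # we didn't resize disc 0
--   # now let's work out the cost, if we don't resize some other disc (which means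
--   # potentially making preceding discs smaller)
--
--   return baseline + cost
--
-- def bin_search(xs, x, key = None):
--    if key is None:
--       key = lambda x: x
--
--    lo, hi = 0, len(xs)
--    while lo < hi:
--       i = (lo + hi) // 2
--       if key(xs[i]) < x:
--          lo = i + 1
--       else:
--          hi = i
--    return lo
--
-- def findMin(R, i, A, memo):
--    if i >= len(R):
--       return 0
--
--    r_i = R[i]
--
--    if R[i] < R[i-1]:
--       R[i] = R[i-1] + 1
--
--    m = memo[i]
--    j = bin_search(m, R[i], lambda x: x[0])
--    if j < len(m) and m[j][0] == R[i]:
--       cost = m[j][1]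
--    else:
--       cost = A * (R[i] - r_i) + findMin(R, i+1, A, memo)
--       m.insert(j, (R[i], cost))
--    R[i] = r_i
--    return cost
-- ===== SOURCE B (Python) =====
-- def getMinimumSecondsRequired(N, R, A, B):
--     cost = 0
--     prev = 0
--     for i, r in enumerate(R, 1):
--         cur = max(r, i)
--         if cur < prev:
--             cur = prev + 1
--         cost += A * (cur - r)
--         prev = cur
--     return cost
-- ===== Notes on version B (the rewrite author's own statement) =====
-- stated objective: simpler
-- what changed: B fuses A's separate baseline-adjustment pass and its memoised recursive forward chain (with dead binary-search/memo machinery) into one forward loop carrying a single prev accumulator; per disc it takes cur = max(r, i) bumped to prev+1 when below prev and adds A*(cur-r).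
import Mathlib
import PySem

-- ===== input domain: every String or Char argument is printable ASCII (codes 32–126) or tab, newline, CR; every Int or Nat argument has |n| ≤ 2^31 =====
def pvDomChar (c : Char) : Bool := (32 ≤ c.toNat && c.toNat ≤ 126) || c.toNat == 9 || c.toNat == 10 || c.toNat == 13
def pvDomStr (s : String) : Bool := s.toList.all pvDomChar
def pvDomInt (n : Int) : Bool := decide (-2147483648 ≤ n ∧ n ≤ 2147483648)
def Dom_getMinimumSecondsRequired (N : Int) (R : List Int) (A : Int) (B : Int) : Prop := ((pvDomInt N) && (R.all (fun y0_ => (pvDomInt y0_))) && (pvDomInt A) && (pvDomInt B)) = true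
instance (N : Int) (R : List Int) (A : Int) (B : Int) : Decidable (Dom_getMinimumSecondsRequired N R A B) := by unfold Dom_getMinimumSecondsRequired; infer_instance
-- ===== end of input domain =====

-- B fuses A's baseline pass + memoised recursion into one forward loop with a `prev` accumulator (objective: simpler).
-- A mutates only its local copy `[0] + R`; neither program mutates the caller's list.

-- ===== PORT A =====

-- bin_search's while-loop (key is always `fst` at the one call site); xs[i] has 0 ≤ lo ≤ i < hi ≤ len xs in Python, so getD is exact there.
def pvBinSearch (xs : List (Int × Int)) (x : Int) (lo hi : Nat) : Nat :=
  if _h : lo < hi then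
    let i := (lo + hi) / 2
    if (xs.getD i (0, 0)).1 < x then pvBinSearch xs x (i + 1) hi
    else pvBinSearch xs x lo i
  else lo
termination_by hi - lo
decreasing_by all_goals omega

-- findMin: state-passing transliteration (returns cost, the restored R, the updated memo).
-- fuel is only for termination; every call site supplies fuel > len R - i, so the fuel-0 branch is unreachable.
-- `m` aliases `memo[i]` in Python; the recursive call only touches entries > i, so `m.insert` is `set i` on the returned memo's entry i.
def pvFindMin (A : Int) (fuel : Nat) (R : List Int) (memo : List (List (Int × Int))) (i : Nat) :
    Int × List Int × List (List (Int × Int)) :=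
  match fuel with
  | 0 => (0, R, memo)
  | fuel + 1 =>
    if i ≥ R.length then (0, R, memo)
    else
      let r_i := R.getD i 0
      let R1 := if R.getD i 0 < R.getD (i - 1) 0 then R.set i (R.getD (i - 1) 0 + 1) else R
      let m := memo.getD i []
      let j := pvBinSearch m (R1.getD i 0) 0 m.length
      if j < m.length ∧ (m.getD j (0, 0)).1 = R1.getD i 0 then
        ((m.getD j (0, 0)).2, R1.set i r_i, memo)
      else
        let rec2 := pvFindMin A fuel R1 memo (i + 1)
        let cost := A * (R1.getD i 0 - r_i) + rec2.1
        let memo3 := rec2.2.2.set i (PySem.List.insert (rec2.2.2.getD i []) (j : Int) (R1.getD i 0, cost))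
        (cost, R1.set i r_i, memo3)

def getMinimumSecondsRequired (N : Int) (R : List Int) (A : Int) (B : Int) : Int :=
  let R0 : List Int := 0 :: R                                   -- R = [0] + R
  let memo : List (List (Int × Int)) := R0.map (fun _ => [])    -- memo = [[] for _ in R]
  -- baseline loop: for i, r in enumerate(R): …  (enumerate index is ≥ 0, so .toNat is exact)
  let st := (PySem.List.enumerate R0 0).foldl
    (fun (st : Int × List Int) (p : Int × Int) =>
      if p.2 < p.1 then (st.1 + A * (p.1 - p.2), st.2.set p.1.toNat p.1) else st)
    (0, R0)
  let cost := (pvFindMin A (st.2.length + 1) st.2 memo 1).1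
  st.1 + cost

-- ===== PORT B =====
def getMinimumSecondsRequired_alt (N : Int) (R : List Int) (A : Int) (B : Int) : Int :=
  ((PySem.List.enumerate R 1).foldl
    (fun (st : Int × Int) (p : Int × Int) =>
      let cur0 := max p.2 p.1
      let cur := if cur0 < st.2 then st.2 + 1 else cur0
      (st.1 + A * (cur - p.2), cur))
    (0, 0)).1

-- ===== PRECONDITION & SPEC =====
def Spec_getMinimumSecondsRequired (N : Int) (R : List Int) (A : Int) (B : Int) (out : Int) : Prop := out = getMinimumSecondsRequired_alt N R A B
instance (N : Int) (R : List Int) (A : Int) (B : Int) (out : Int) : Decidable (Spec_getMinimumSecondsRequired N R A B out) := by unfold Spec_getMinimumSecondsRequired; infer_instance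

-- ===== CLAIM (what is proved, stated in full; the proofs are below) =====
def Claim_equal_getMinimumSecondsRequired : Prop := ∀ (N : Int) (R : List Int) (A : Int) (B : Int), Dom_getMinimumSecondsRequired N R A B → Spec_getMinimumSecondsRequired N R A B (getMinimumSecondsRequired N R A B)

-- ===== LEMMAS AND PROOFS =====

-- Pure view of findMin's forward chain (prev = adjusted value of the previous disc).
def pvChain (A prev : Int) : List Int → Int
  | [] => 0
  | r :: t =>
    let cur := if r < prev then prev + 1 else r
    A * (cur - r) + pvChain A cur t

-- Pointwise baseline adjustment R[i] := max(R[i], i) and its cost.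
def pvAdj (k : Nat) : List Int → List Int
  | [] => []
  | r :: t => (if r < (k : Int) then (k : Int) else r) :: pvAdj (k + 1) t

def pvBsum (A : Int) (k : Nat) : List Int → Int
  | [] => 0
  | r :: t => (if r < (k : Int) then A * ((k : Int) - r) else 0) + pvBsum A (k + 1) t

-- Pure view of B's loop.
theorem pvSetTake (l : List Int) (k : Nat) (v : Int) (h : k < l.length) :
    (l.set k v).take (k + 1) = l.take k ++ [v] := by
  induction l generalizing k with
  | nil => simp at h
  | cons x t ih =>
    cases k with
    | zero => simp
    | succ k => simp at h ⊢; exact ih k h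

theorem pvSetDrop (l : List Int) (k : Nat) (v : Int) (h : k < l.length) :
    (l.set k v).drop (k + 1) = l.drop (k + 1) := by
  induction l generalizing k with
  | nil => simp at h
  | cons x t ih =>
    cases k with
    | zero => simp
    | succ k => simp at h ⊢; exact ih k h

def pvBgo (A k prev : Int) : List Int → Int
  | [] => 0
  | r :: t =>
    let cur0 := max r k
    let cur := if cur0 < prev then prev + 1 else cur0
    A * (cur - r) + pvBgo A (k + 1) cur t

theorem pvBinSearch_nil (x : Int) : pvBinSearch [] x 0 0 = 0 := by
  simp [pvBinSearch]

theorem pvFindMin_eq_chain (A : Int) (fuel : Nat) :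
    ∀ (R : List Int) (memo : List (List (Int × Int))) (i : Nat),
      (∀ k, memo.getD k [] = ([] : List (Int × Int))) → R.length ≤ i + fuel →
      (pvFindMin A fuel R memo i).1 = pvChain A (R.getD (i - 1) 0) (R.drop i) := by
  induction fuel with
  | zero =>
    intro R memo i hm hlen
    have hd : R.drop i = [] := List.drop_eq_nil_of_le (by omega)
    simp [pvFindMin, hd, pvChain]
  | succ fuel ih =>
    intro R memo i hm hlen
    by_cases hi : R.length ≤ i
    · have hd : R.drop i = [] := List.drop_eq_nil_of_le hi
      simp [pvFindMin, hi, hd, pvChain]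
    · rw [not_le] at hi
      simp only [pvFindMin, ge_iff_le]
      rw [if_neg (not_le.mpr hi)]
      simp only [hm i, List.length_nil, pvBinSearch_nil]
      rw [if_neg (by simp)]
      dsimp only
      set cur := if R.getD i 0 < R.getD (i - 1) 0 then R.getD (i - 1) 0 + 1 else R.getD i 0 with hcur
      set R1 := if R.getD i 0 < R.getD (i - 1) 0 then R.set i (R.getD (i - 1) 0 + 1) else R with hR1
      have hR1len : R1.length = R.length := by
        rw [hR1]; split_ifs <;> simp
      have hR1i : R1.getD i 0 = cur := by
        rw [hR1, hcur]; split_ifs with hb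
        · rw [List.getD_eq_getElem _ _ (by simp; omega), List.getElem_set_self]
        · rfl
      have hR1drop : R1.drop (i + 1) = R.drop (i + 1) := by
        rw [hR1]; split_ifs with hb
        · exact pvSetDrop _ _ _ hi
        · rfl
      rw [ih R1 memo (i + 1) hm (by omega)]
      have h1 : i + 1 - 1 = i := by omega
      rw [h1, hR1i, hR1drop]
      rw [List.drop_eq_getElem_cons hi]
      simp only [pvChain]
      have hRi : R.getD i 0 = R[i] := List.getD_eq_getElem R 0 hi
      rw [← hRi, ← hcur]

theorem pvBaseline_fold (A : Int) :
    ∀ (rs Rc : List Int) (k : Nat) (b : Int), Rc.drop k = rs →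
      ((PySem.List.enumerate rs (k : Int)).foldl
        (fun (st : Int × List Int) (p : Int × Int) =>
          if p.2 < p.1 then (st.1 + A * (p.1 - p.2), st.2.set p.1.toNat p.1) else st)
        (b, Rc)) = (b + pvBsum A k rs, Rc.take k ++ pvAdj k rs) := by
  intro rs
  induction rs with
  | nil =>
    intro Rc k b h
    have hk : Rc.length ≤ k := by
      have := congrArg List.length h; simp at this; omega
    rw [PySem.List.enumerate_nil]
    simp [pvBsum, pvAdj, List.take_of_length_le hk]
  | cons r t ih =>
    intro Rc k b h
    have hk : k < Rc.length := by
      have := congrArg List.length h; simp at this; omega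
    have hget : Rc[k]? = some r := by
      have := congrArg (fun l => l[0]?) h
      simpa [List.getElem?_drop] using this
    have hdrop1 : Rc.drop (k + 1) = t := by
      have h2 : (Rc.drop k).drop 1 = t := by rw [h]; rfl
      rwa [List.drop_drop] at h2
    rw [PySem.List.enumerate_cons, List.foldl_cons]
    dsimp only
    have hcast : (k : Int) + 1 = ((k + 1 : Nat) : Int) := by push_cast; ring
    by_cases hc : r < (k : Int)
    · rw [if_pos hc]
      simp only [Int.toNat_natCast, hcast]
      rw [ih (Rc.set k (k : Int)) (k + 1) (b + A * ((k : Int) - r))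
          (by rw [pvSetDrop _ _ _ hk]; exact hdrop1)]
      rw [pvSetTake _ _ _ hk]
      simp only [pvBsum, pvAdj, if_pos hc]
      rw [Prod.mk.injEq]
      constructor
      · ring
      · simp
    · rw [if_neg hc]
      simp only [hcast]
      rw [ih Rc (k + 1) b hdrop1]
      simp only [pvBsum, pvAdj, if_neg hc]
      rw [Prod.mk.injEq]
      constructor
      · ring
      · rw [List.take_add_one, hget]
        simp

theorem pvBfold (A : Int) :
    ∀ (rs : List Int) (k : Int) (cost prev : Int),
      ((PySem.List.enumerate rs k).foldl
        (fun (st : Int × Int) (p : Int × Int) =>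
          let cur0 := max p.2 p.1
          let cur := if cur0 < st.2 then st.2 + 1 else cur0
          (st.1 + A * (cur - p.2), cur))
        (cost, prev)).1 = cost + pvBgo A k prev rs := by
  intro rs
  induction rs with
  | nil => intro k cost prev; simp [pvBgo, PySem.List.enumerate_nil]
  | cons r t ih =>
    intro k cost prev
    rw [PySem.List.enumerate_cons]
    simp only [List.foldl_cons]
    rw [ih]
    simp only [pvBgo]
    ring

theorem pvCombine (A : Int) :
    ∀ (rs : List Int) (k : Nat) (prev : Int),
      pvBsum A k rs + pvChain A prev (pvAdj k rs) = pvBgo A (k : Int) prev rs := by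
  intro rs
  induction rs with
  | nil => intro k prev; simp [pvBsum, pvChain, pvAdj, pvBgo]
  | cons r t ih =>
    intro k prev
    simp only [pvBsum, pvChain, pvAdj, pvBgo]
    have ha : (if r < (k : Int) then (k : Int) else r) = max r (k : Int) := by
      rw [max_def]; split_ifs <;> omega
    rw [ha]
    set cur := if max r (k : Int) < prev then prev + 1 else max r (k : Int) with hcur
    have ih' := ih (k + 1) cur
    push_cast at ih' ⊢
    have hx : (if r < (k : Int) then A * ((k : Int) - r) else 0) + A * (cur - max r (k : Int))
        = A * (cur - r) := by
      rcases lt_trichotomy r (k : Int) with h | h | h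
      · rw [if_pos h, max_eq_right h.le]; ring
      · subst h; rw [if_neg (lt_irrefl _), max_self]; ring
      · rw [if_neg (not_lt.mpr h.le), max_eq_left h.le]; ring
    linarith [ih', hx]

theorem pvConstMemo (L : List Int) : ∀ k, (L.map (fun _ => ([] : List (Int × Int)))).getD k [] = [] := by
  induction L with
  | nil => intro k; simp
  | cons x t ih => intro k; cases k <;> simp [ih]

-- ===== VERDICT (by name: the statement is the Claim_ definition above) =====
theorem getMinimumSecondsRequired_spec : Claim_equal_getMinimumSecondsRequired := by
  intro N R A B _
  show getMinimumSecondsRequired N R A B = getMinimumSecondsRequired_alt N R A B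
  unfold getMinimumSecondsRequired getMinimumSecondsRequired_alt
  dsimp only
  have hb := pvBaseline_fold A (0 :: R) (0 :: R) 0 0 (by simp)
  push_cast at hb
  rw [hb]
  dsimp only
  have hadj : pvAdj 0 (0 :: R) = 0 :: pvAdj 1 R := by simp [pvAdj]
  have hbs : pvBsum A 0 (0 :: R) = pvBsum A 1 R := by simp [pvBsum]
  simp only [List.take_zero, List.nil_append, hadj, hbs]
  rw [pvFindMin_eq_chain A ((0 :: pvAdj 1 R).length + 1) (0 :: pvAdj 1 R)
      ((0 :: R).map (fun _ => [])) 1 (pvConstMemo (0 :: R)) (by omega)]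
  simp only [List.drop_succ_cons, List.drop_zero]
  have hcomb := pvCombine A R 1 0
  push_cast at hcomb
  have hbf := pvBfold A R 1 0 0
  rw [hbf]
  have h0 : (0 :: pvAdj 1 R).getD (1 - 1) 0 = 0 := rfl
  rw [h0]
  linarith [hcomb]
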